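-- pv_equiv track=rewrite | github.com/pstroppa/machine_learning | E3/coding/functions.py | recreate_index
-- ===== SOURCE A (Python) =====
-- def recreate_index(liste):
--     """
--     The list 'liste' contains the indices of nodes pruned.
--     The crucial point is that those indices are based on a steadily changing situation of nodes.
--     Hence for de-pruning purposes, one has to recompute the original indices of the pruned nodes.
--     This functionality is provided by this function.
--     :param liste: list of int
--     :returns new_list: list of int
--     """
--     new_list=[]
--     for elem in liste:
--         add=0
--         for new in new_list:
--             if new <=elem+add:
--                 add+=1
--         new_list.append(elem+add)
--         new_list.sort()
--
--     return new_list
-- ===== SOURCE B (Python) =====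
-- def recreate_index(liste):
--     # binary search for the end of the prefix {i : a[i] <= elem+i} of the
--     # sorted list a, then insert positionally; no per-element scan, no re-sort
--     a = []
--     for elem in liste:
--         lo, hi = 0, len(a)
--         while lo < hi:
--             mid = (lo + hi) // 2
--             if a[mid] <= elem + mid:
--                 lo = mid + 1
--             else:
--                 hi = mid
--         a.insert(lo, elem + lo)
--     return a
-- ===== Notes on version B (the rewrite author's own statement) =====
-- stated objective: faster
-- what changed: A re-derives each original index with an accumulator-dependent linear bump scan and fully re-sorts the list after every append; B binary-searches for the end of the prefix {i : a[i] <= elem+i} of the list it keeps sorted by positional insertion, never scanning or re-sorting.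
import Mathlib
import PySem

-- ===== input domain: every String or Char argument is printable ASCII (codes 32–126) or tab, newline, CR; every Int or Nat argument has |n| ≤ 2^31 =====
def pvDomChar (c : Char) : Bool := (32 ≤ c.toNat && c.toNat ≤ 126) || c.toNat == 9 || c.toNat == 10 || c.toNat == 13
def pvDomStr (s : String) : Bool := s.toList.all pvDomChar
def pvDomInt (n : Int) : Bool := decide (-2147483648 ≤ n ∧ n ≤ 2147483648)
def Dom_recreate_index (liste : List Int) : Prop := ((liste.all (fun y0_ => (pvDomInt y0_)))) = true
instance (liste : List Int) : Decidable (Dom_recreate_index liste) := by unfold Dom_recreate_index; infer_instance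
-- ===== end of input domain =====

-- B finds each original index by binary search for the end of the prefix
-- {i : a[i] <= elem+i} of its sorted accumulator and inserts positionally,
-- instead of A's linear bump scan followed by a full re-sort each iteration.

-- ===== PORT A =====
def recreate_index (liste : List Int) : List Int :=
  liste.foldl (fun new_list elem =>
    let add : Int := new_list.foldl (fun add new => if new ≤ elem + add then add + 1 else add) 0
    PySem.List.sorted (new_list ++ [elem + add]) (fun x => x) false) []

-- ===== PORT B =====
/-- the `while lo < hi` binary-search loop of Source B; lo, hi stay in [0, len a],
so Nat lo/hi and `getD` are exact for Python's non-negative in-range `a[mid]`,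
and `(lo+hi)//2` on non-negatives is Nat division;
structurally recursive on a fuel bound on hi - lo (the loop runs at most
`a.length` times), so the port stays kernel-reducible -/
def pvBSearch (a : List Int) (elem : Int) : Nat → Nat → Nat → Nat
  | 0, lo, _ => lo
  | fuel + 1, lo, hi =>
    if lo < hi then
      let mid := (lo + hi) / 2
      if a.getD mid 0 ≤ elem + (mid : Int) then pvBSearch a elem fuel (mid + 1) hi
      else pvBSearch a elem fuel lo mid
    else lo

def recreate_index_alt (liste : List Int) : List Int :=
  liste.foldl (fun a elem =>
    let lo := pvBSearch a elem a.length 0 a.length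
    PySem.List.insert a (lo : Int) (elem + (lo : Int))) []

-- ===== PRECONDITION & SPEC =====
def Spec_recreate_index (liste : List Int) (out : List Int) : Prop := out = recreate_index_alt liste
instance (liste : List Int) (out : List Int) : Decidable (Spec_recreate_index liste out) := by unfold Spec_recreate_index; infer_instance

-- ===== CLAIM (what is proved, stated in full; the proofs are below) =====
def Claim_equal_recreate_index : Prop := ∀ (liste : List Int), Dom_recreate_index liste → Spec_recreate_index liste (recreate_index liste)

-- ===== LEMMAS AND PROOFS =====

/-- prefix count: number of leading positions i with l[i] ≤ e + i -/
def pvCnt : List Int → Int → Nat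
  | [], _ => 0
  | x :: r, e => (if x ≤ e then 1 else 0) + pvCnt r (e + 1)

lemma pvCnt_le_length (l : List Int) (e : Int) : pvCnt l e ≤ l.length := by
  induction l generalizing e with
  | nil => simp [pvCnt]
  | cons x r ih =>
    simp only [pvCnt, List.length_cons]
    have := ih (e + 1)
    split <;> omega

lemma pvCnt_eq_zero (l : List Int) (e : Int) (hp : l.Pairwise (· < ·))
    (h : ∀ s ∈ l, e < s) : pvCnt l e = 0 := by
  induction l generalizing e with
  | nil => rfl
  | cons x r ih =>
    have hx := h x (List.mem_cons_self)
    simp only [pvCnt, if_neg (by omega : ¬ x ≤ e)]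
    rw [List.pairwise_cons] at hp
    have := ih (e + 1) hp.2 (fun s hs => by have := hp.1 s hs; omega)
    omega

lemma pvCnt_getElem (l : List Int) (e : Int) (hp : l.Pairwise (· < ·)) :
    ∀ (i : Nat) (h : i < l.length),
      (i < pvCnt l e → l[i] ≤ e + i) ∧ (pvCnt l e ≤ i → e + i < l[i]) := by
  induction l generalizing e with
  | nil => intro i h; simp at h
  | cons x r ih =>
    rw [List.pairwise_cons] at hp
    intro i h
    by_cases hx : x ≤ e
    · have hk : pvCnt (x :: r) e = pvCnt r (e + 1) + 1 := by
        simp [pvCnt, if_pos hx]; omega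
      cases i with
      | zero => simpa [hk] using hx
      | succ j =>
        have hj : j < r.length := by simpa using h
        obtain ⟨c1, c2⟩ := ih (e + 1) hp.2 j hj
        rw [hk]
        constructor
        · intro hlt
          have := c1 (by omega)
          simp only [List.getElem_cons_succ]; push_cast; omega
        · intro hge
          have := c2 (by omega)
          simp only [List.getElem_cons_succ]; push_cast; omega
    · have hk : pvCnt (x :: r) e = 0 := by
        have hz : pvCnt r (e + 1) = 0 :=
          pvCnt_eq_zero r (e + 1) hp.2 (fun s hs => by have := hp.1 s hs; omega)
        simp [pvCnt, if_neg hx, hz]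
      rw [hk]
      refine ⟨by omega, fun _ => ?_⟩
      cases i with
      | zero => simpa using by omega
      | succ j =>
        have hj : j < r.length := by simpa using h
        obtain ⟨_, c2⟩ := ih (e + 1) hp.2 j hj
        have hz : pvCnt r (e + 1) = 0 :=
          pvCnt_eq_zero r (e + 1) hp.2 (fun s hs => by have := hp.1 s hs; omega)
        have := c2 (by omega)
        simp only [List.getElem_cons_succ]; push_cast; omega

lemma pvBSearch_eq (a : List Int) (e : Int) (k : Nat) (_hk : k ≤ a.length)
    (H : ∀ (i : Nat) (h : i < a.length),
      (i < k → a[i] ≤ e + i) ∧ (k ≤ i → e + i < a[i])) :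
    ∀ (d lo hi : Nat), hi - lo ≤ d → lo ≤ k → k ≤ hi → hi ≤ a.length →
      pvBSearch a e d lo hi = k := by
  intro d
  induction d with
  | zero =>
    intro lo hi h1 h2 h3 h4
    simp only [pvBSearch]
    omega
  | succ n ih =>
    intro lo hi h1 h2 h3 h4
    rw [pvBSearch]
    by_cases hlt : lo < hi
    · simp only [if_pos hlt]
      have hmid1 : lo ≤ (lo + hi) / 2 := by omega
      have hmid2 : (lo + hi) / 2 < hi := by omega
      have hmlen : (lo + hi) / 2 < a.length := by omega
      have hgd : a.getD ((lo + hi) / 2) 0 = a[(lo + hi) / 2] :=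
        List.getD_eq_getElem a 0 hmlen
      obtain ⟨c1, c2⟩ := H ((lo + hi) / 2) hmlen
      by_cases hc : a.getD ((lo + hi) / 2) 0 ≤ e + (((lo + hi) / 2 : Nat) : Int)
      · rw [if_pos hc]
        have hmk : (lo + hi) / 2 < k := by
          by_contra hcon
          have := c2 (by omega)
          rw [hgd] at hc; omega
        exact ih ((lo + hi) / 2 + 1) hi (by omega) (by omega) h3 h4
      · rw [if_neg hc]
        have hmk : k ≤ (lo + hi) / 2 := by
          by_contra hcon
          have := c1 (by omega)
          rw [hgd] at hc; omega
        exact ih lo ((lo + hi) / 2) (by omega) h2 (by omega) (by omega)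
    · simp only [if_neg hlt]; omega

lemma addFold_const (l : List Int) (e : Int) (c : Int)
    (h : ∀ s ∈ l, e + c < s) :
    l.foldl (fun add new => if new ≤ e + add then add + 1 else add) c = c := by
  induction l with
  | nil => rfl
  | cons x r ih =>
    rw [List.foldl_cons, if_neg (by have := h x (List.mem_cons_self); omega)]
    exact ih (fun s hs => h s (List.mem_cons_of_mem _ hs))

lemma addFold_eq_pvCnt (l : List Int) (e : Int) (hp : l.Pairwise (· < ·)) :
    ∀ c : Int,
      l.foldl (fun add new => if new ≤ e + add then add + 1 else add) c
      = c + (pvCnt l (e + c) : Int) := by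
  induction l with
  | nil => intro c; simp [pvCnt]
  | cons x r ih =>
    intro c
    rw [List.pairwise_cons] at hp
    rw [List.foldl_cons]
    simp only [pvCnt]
    by_cases hx : x ≤ e + c
    · rw [if_pos hx, if_pos hx, ih hp.2 (c + 1)]
      have : e + (c + 1) = e + c + 1 := by ring
      rw [this]; push_cast; ring
    · rw [if_neg hx, if_neg hx]
      have hz : pvCnt r (e + c + 1) = 0 :=
        pvCnt_eq_zero r (e + c + 1) hp.2
          (fun s hs => by have := hp.1 s hs; omega)
      rw [addFold_const r e c (fun s hs => by have := hp.1 s hs; omega), hz]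
      push_cast; ring

lemma pvCnt_bounds (l : List Int) (e : Int) (hp : l.Pairwise (· < ·)) :
    (∀ s ∈ l.take (pvCnt l e), s < e + pvCnt l e) ∧
    (∀ s ∈ l.drop (pvCnt l e), e + (pvCnt l e : Int) < s) := by
  induction l generalizing e with
  | nil => simp
  | cons x r ih =>
    rw [List.pairwise_cons] at hp
    by_cases hx : x ≤ e
    · have hk : pvCnt (x :: r) e = pvCnt r (e + 1) + 1 := by
        simp [pvCnt, if_pos hx]; omega
      obtain ⟨h1, h2⟩ := ih (e + 1) hp.2
      constructor
      · intro s hs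
        rw [hk, List.take_succ_cons] at hs
        rcases List.mem_cons.mp hs with h | h
        · subst h; rw [hk]; push_cast; omega
        · have := h1 s h; rw [hk]; push_cast at this ⊢; omega
      · intro s hs
        rw [hk, List.drop_succ_cons] at hs
        have := h2 s hs
        rw [hk]; push_cast at this ⊢; omega
    · have hk : pvCnt (x :: r) e = 0 := by
        have hz : pvCnt r (e + 1) = 0 :=
          pvCnt_eq_zero r (e + 1) hp.2 (fun s hs => by have := hp.1 s hs; omega)
        simp [pvCnt, if_neg hx, hz]
      rw [hk]
      refine ⟨by simp, ?_⟩
      intro s hs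
      simp only [List.drop_zero] at hs
      rcases List.mem_cons.mp hs with h | h
      · subst h; push_cast; omega
      · have := hp.1 s h; push_cast; omega

lemma step_eq (l : List Int) (e : Int) (hp : l.Pairwise (· < ·)) :
    let k := pvCnt l e
    PySem.List.sorted (l ++ [e + (k : Int)]) (fun x => x) false
      = l.take k ++ (e + (k : Int)) :: l.drop k ∧
    (l.take k ++ (e + (k : Int)) :: l.drop k).Pairwise (· < ·) := by
  intro k
  obtain ⟨h1, h2⟩ := pvCnt_bounds l e hp
  have hsplit : l.take k ++ l.drop k = l := List.take_append_drop k l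
  have hpw : (l.take k ++ l.drop k).Pairwise (· < ·) := by rw [hsplit]; exact hp
  rw [List.pairwise_append] at hpw
  have hres : (l.take k ++ (e + (k : Int)) :: l.drop k).Pairwise (· < ·) := by
    rw [List.pairwise_append]
    refine ⟨hpw.1, ?_, ?_⟩
    · rw [List.pairwise_cons]
      exact ⟨h2, hpw.2.1⟩
    · intro a ha b hb
      rcases List.mem_cons.mp hb with h | h
      · subst h; exact h1 a ha
      · exact hpw.2.2 a ha b h
  refine ⟨?_, hres⟩
  apply PySem.List.sorted_eq_of_perm_of_pairwise_lt
  · have hstep : ((e + (k : Int)) :: l.drop k).Perm (l.drop k ++ [e + (k : Int)]) :=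
      (List.perm_append_singleton _ _).symm
    have := List.Perm.append_left (l.take k) hstep
    rw [← List.append_assoc, hsplit] at this
    exact this
  · exact hres

lemma fold_eq (liste : List Int) :
    ∀ acc : List Int, acc.Pairwise (· < ·) →
      liste.foldl (fun new_list elem =>
        let add : Int := new_list.foldl (fun add new => if new ≤ elem + add then add + 1 else add) 0
        PySem.List.sorted (new_list ++ [elem + add]) (fun x => x) false) acc
      = liste.foldl (fun a elem =>
        let lo := pvBSearch a elem a.length 0 a.length
        PySem.List.insert a (lo : Int) (elem + (lo : Int))) acc := by
  induction liste with
  | nil => intro acc _; rfl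
  | cons e rest ih =>
    intro acc hp
    rw [List.foldl_cons, List.foldl_cons]
    have hadd : acc.foldl (fun add new => if new ≤ e + add then add + 1 else add) 0
        = (pvCnt acc e : Int) := by
      rw [addFold_eq_pvCnt acc e hp 0]; simp
    have hk : pvBSearch acc e acc.length 0 acc.length = pvCnt acc e :=
      pvBSearch_eq acc e (pvCnt acc e) (pvCnt_le_length acc e)
        (pvCnt_getElem acc e hp) acc.length 0 acc.length (by omega) (by omega)
        (pvCnt_le_length acc e) le_rfl
    obtain ⟨hsorted, hres⟩ := step_eq acc e hp
    have hins : PySem.List.insert acc ((pvCnt acc e : Nat) : Int) (e + (pvCnt acc e : Int))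
        = acc.take (pvCnt acc e) ++ (e + (pvCnt acc e : Int)) :: acc.drop (pvCnt acc e) :=
      PySem.List.insert_natCast acc (pvCnt acc e) _ (pvCnt_le_length acc e)
    simp only [hadd, hk, hins, hsorted]
    exact ih _ hres

-- ===== VERDICT (by name: the statement is the Claim_ definition above) =====
theorem recreate_index_spec : Claim_equal_recreate_index := by
  intro liste _
  unfold Spec_recreate_index recreate_index recreate_index_alt
  exact fold_eq liste [] List.Pairwise.nil
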